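-- pv_equiv track=rewrite | github.com/Frederik-N/projecteuler | problem54/problem54.py | hasThreeOfKind
-- ===== SOURCE A (Python) =====
-- from collections import defaultdict
--
-- def hasThreeOfKind(value, playercards, cards):
--     removeCharacters = ["S", "C", "D", "H", " "]
--     for character in removeCharacters:
--         playercards = playercards.replace(character,"")
--     rankcount = defaultdict(lambda:0)
--     card = [x[0] for x in playercards]
--     for y in card:
--         rankcount[y] += 1
--
--     for x in set(rankcount.values()):
--         if(x==3):
--             return 4, playercards
--
--     return value, cards
-- ===== SOURCE B (Python) =====
-- def hasThreeOfKind(value, playercards, cards):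
--     stripped = ''.join(c for c in playercards if c not in "SCDH ")
--     s = sorted(stripped)
--     while s:
--         c = s[0]
--         run = 1
--         while run < len(s) and s[run] == c:
--             run += 1
--         if run == 3:
--             return 4, stripped
--         s = s[run:]
--     return value, cards
-- ===== Notes on version B (the rewrite author's own statement) =====
-- stated objective: alternative
-- what changed: Replaced A's five successive str.replace passes plus a defaultdict count and a set scan of the counts by a single filter pass to strip suits, then a sort of a throwaway copy and one scan over consecutive equal runs looking for a run of length exactly 3.
import Mathlib
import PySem

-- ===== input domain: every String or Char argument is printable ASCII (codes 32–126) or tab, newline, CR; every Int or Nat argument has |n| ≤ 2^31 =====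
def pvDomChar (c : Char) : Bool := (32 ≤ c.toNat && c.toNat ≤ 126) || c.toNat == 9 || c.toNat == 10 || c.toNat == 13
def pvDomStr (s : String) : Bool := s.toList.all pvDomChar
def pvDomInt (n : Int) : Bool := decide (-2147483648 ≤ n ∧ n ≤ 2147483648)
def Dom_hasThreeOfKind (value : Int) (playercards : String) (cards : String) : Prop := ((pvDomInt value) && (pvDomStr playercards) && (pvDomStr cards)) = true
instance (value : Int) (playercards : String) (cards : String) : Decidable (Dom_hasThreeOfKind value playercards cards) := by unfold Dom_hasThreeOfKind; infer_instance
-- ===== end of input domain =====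

-- B strips the suit/space characters in one filter pass and looks for a consecutive run of
-- length exactly 3 in a sorted throwaway copy, instead of A's five replace passes,
-- defaultdict count and scan over the set of counts (objective: alternative).

-- ===== PORT A =====
def hasThreeOfKind (value : Int) (playercards : String) (cards : String) : Int × String :=
  -- for character in removeCharacters: playercards = playercards.replace(character, "")
  let pc := ["S", "C", "D", "H", " "].foldl (fun s ch => PySem.Str.replace s ch "") playercards
  -- card = [x[0] for x in playercards]  (each x is a 1-char string, x[0] its character)
  let card := pc.toList
  -- rankcount = defaultdict(lambda:0); for y in card: rankcount[y] += 1
  let rankcount := card.foldl (fun d y => d.modify y 0 (· + 1)) (PySem.Dict.empty : PySem.Dict Char Int)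
  -- for x in set(rankcount.values()): if x == 3: return 4, playercards
  match (PySem.Set.ofList rankcount.values).find? (fun x => x == (3 : Int)) with
  | some _ => (4, pc)
  | none => (value, cards)

-- ===== PORT B =====
-- outer while loop of Source B: run = length of the leading equal run of s; then s = s[run:]
def pvRunScan3 : List Char → Bool
  | [] => false
  | c :: rest =>
    let run := 1 + (rest.takeWhile (fun x => x == c)).length
    if run == 3 then true
    else pvRunScan3 (rest.dropWhile (fun x => x == c))
termination_by l => l.length
decreasing_by
  simp only [List.length_cons]
  exact Nat.lt_succ_of_le (List.length_dropWhile_le _ _)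

def hasThreeOfKind_alt (value : Int) (playercards : String) (cards : String) : Int × String :=
  -- stripped = ''.join(c for c in playercards if c not in "SCDH ")
  let stripped := playercards.toList.filter (fun c => !(("SCDH ".toList).contains c))
  -- s = sorted(stripped); scan runs
  if pvRunScan3 (PySem.List.sorted stripped (fun x => x) false) then (4, String.ofList stripped)
  else (value, cards)

-- ===== PRECONDITION & SPEC =====
def Spec_hasThreeOfKind (value : Int) (playercards : String) (cards : String) (out : Int × String) : Prop := out = hasThreeOfKind_alt value playercards cards
instance (value : Int) (playercards : String) (cards : String) (out : Int × String) : Decidable (Spec_hasThreeOfKind value playercards cards out) := by unfold Spec_hasThreeOfKind; infer_instance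

-- ===== CLAIM (what is proved, stated in full; the proofs are below) =====
def Claim_equal_hasThreeOfKind : Prop := ∀ (value : Int) (playercards : String) (cards : String), Dom_hasThreeOfKind value playercards cards → Spec_hasThreeOfKind value playercards cards (hasThreeOfKind value playercards cards)

-- ===== LEMMAS AND PROOFS =====

-- str.replace with a single-character pattern and empty replacement is a filter (go loop)
theorem pv_replace_go_filter (c : Char) : ∀ (fuel : Nat) (l acc : List Char), l.length ≤ fuel →
    PySem.Chars.replace.go [c] [] fuel l acc = acc.reverse ++ l.filter (fun x => !(x == c)) := by
  intro fuel
  induction fuel with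
  | zero =>
    intro l acc h
    have : l = [] := List.length_eq_zero_iff.mp (Nat.le_zero.mp h)
    subst this
    simp [PySem.Chars.replace.go]
  | succ n ih =>
    intro l acc h
    cases l with
    | nil => simp [PySem.Chars.replace.go]
    | cons x t =>
      rw [PySem.Chars.replace.go]
      by_cases hx : x = c
      · subst hx
        have hpre : List.isPrefixOf [x] (x :: t) = true := by simp [List.isPrefixOf]
        simp only [hpre, if_pos]
        rw [ih _ _ (by simpa using Nat.le_of_succ_le_succ h)]
        simp
      · have hpre : List.isPrefixOf [c] (x :: t) = false := by
          simp [List.isPrefixOf]; exact fun hh => absurd hh.symm hx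
        simp only [hpre]
        rw [if_neg (by simp)]
        rw [ih _ _ (by simpa using Nat.le_of_succ_le_succ h)]
        simp [hx]

theorem pv_replace_filter (c : Char) (l : List Char) :
    PySem.Chars.replace l [c] [] = l.filter (fun x => !(x == c)) := by
  rw [PySem.Chars.replace]
  simp only [List.isEmpty_cons, Bool.false_eq_true, if_false]
  exact (pv_replace_go_filter c l.length l [] le_rfl).trans (by simp)

-- A's five successive replaces produce exactly B's one-pass filter
theorem pv_strip_eq (s : String) :
    (["S", "C", "D", "H", " "].foldl (fun s ch => PySem.Str.replace s ch "") s).toList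
      = s.toList.filter (fun c => !(("SCDH ".toList).contains c)) := by
  simp only [List.foldl_cons, List.foldl_nil]
  rw [PySem.Str.toList_replace, PySem.Str.toList_replace, PySem.Str.toList_replace,
      PySem.Str.toList_replace, PySem.Str.toList_replace]
  simp only [show ("S":String).toList = ['S'] from rfl, show ("C":String).toList = ['C'] from rfl,
    show ("D":String).toList = ['D'] from rfl, show ("H":String).toList = ['H'] from rfl,
    show (" ":String).toList = [' '] from rfl, show ("":String).toList = [] from rfl,
    show ("SCDH ":String).toList = ['S','C','D','H',' '] from rfl]
  rw [pv_replace_filter, pv_replace_filter, pv_replace_filter, pv_replace_filter, pv_replace_filter]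
  simp only [List.filter_filter]
  apply List.filter_congr
  intro x _
  simp only [List.contains_cons, List.contains_nil, Bool.or_false, Bool.not_or]
  cases hx : (x == 'S') <;> cases (x == 'C') <;> cases (x == 'D') <;> cases (x == 'H') <;> cases (x == ' ') <;> simp_all

-- A's condition: some rank occurs exactly three times
theorem pv_condA (L : List Char) :
    ((PySem.Set.ofList (L.foldl (fun d y => d.modify y 0 (· + 1)) (PySem.Dict.empty : PySem.Dict Char Int)).values).find? (fun x => x == (3 : Int))).isSome
      ↔ ∃ ch ∈ L, L.count ch = 3 := by
  rw [← PySem.Dict.counter_eq_foldl,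
      PySem.Dict.values_eq_map_keys _ (PySem.Dict.nodup_keys_counter L) 0,
      List.find?_isSome]
  simp only [PySem.Dict.keys_counter, PySem.Dict.getD_counter]
  constructor
  · rintro ⟨x, hx, hx3⟩
    rw [PySem.Set.mem_ofList] at hx
    obtain ⟨k, hk, rfl⟩ := List.mem_map.mp hx
    refine ⟨k, (PySem.Set.mem_ofList _ _).mp hk, ?_⟩
    have := of_decide_eq_true (by simpa [BEq.beq] using hx3)
    exact_mod_cast this
  · rintro ⟨ch, hch, hc⟩
    exact ⟨(L.count ch : Int),
      (PySem.Set.mem_ofList _ _).mpr (List.mem_map.mpr ⟨ch, (PySem.Set.mem_ofList _ _).mpr hch, rfl⟩),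
      by simp [hc]⟩

-- everything after a dropped run is strictly above the run's character (sorted list)
theorem pv_tail_gt (c : Char) (rest : List Char) (hp : (c :: rest).Pairwise (· ≤ ·)) :
    ∀ y ∈ rest.dropWhile (fun x => x == c), c < y := by
  intro y hy
  have hne : rest.dropWhile (fun x => x == c) ≠ [] := List.ne_nil_of_mem hy
  set tail := rest.dropWhile (fun x => x == c) with htail
  have hhead : ((tail.head hne) == c) = false := List.head_dropWhile_not _ hne
  have hheadne : tail.head hne ≠ c := by simpa using hhead
  have hheadmem : tail.head hne ∈ rest := (List.dropWhile_sublist _).mem (List.head_mem hne)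
  have hc_le : c ≤ tail.head hne := (List.pairwise_cons.mp hp).1 _ hheadmem
  have hc_lt : c < tail.head hne := lt_of_le_of_ne hc_le (Ne.symm hheadne)
  have htp : tail.Pairwise (· ≤ ·) := List.Pairwise.sublist (List.dropWhile_sublist _) (List.pairwise_cons.mp hp).2
  rcases (eq_or_ne y (tail.head hne)) with h | h
  · rw [h]; exact hc_lt
  · cases ht : tail with
    | nil => simp [ht] at hy
    | cons y0 ys =>
      have hy0 : y0 = tail.head hne := by simp [ht]
      rw [ht] at hy htp
      rcases List.mem_cons.mp hy with h' | hy'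
      · rw [h', hy0]; exact hc_lt
      · have hle : y0 ≤ y := (List.pairwise_cons.mp htp).1 y hy'
        calc c < y0 := by rw [hy0]; exact hc_lt
          _ ≤ y := hle

theorem pv_count_head (c : Char) (rest : List Char) (hp : (c :: rest).Pairwise (· ≤ ·)) :
    (c :: rest).count c = 1 + (rest.takeWhile (fun x => x == c)).length := by
  have hsplit : rest.takeWhile (fun x => x == c) ++ rest.dropWhile (fun x => x == c) = rest :=
    List.takeWhile_append_dropWhile
  have h1 : (rest.takeWhile (fun x => x == c)).count c = (rest.takeWhile (fun x => x == c)).length :=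
    List.count_eq_length.mpr (fun b hb => ((by simpa using List.mem_takeWhile_imp hb) : b = c).symm)
  have h2 : (rest.dropWhile (fun x => x == c)).count c = 0 :=
    List.count_eq_zero.mpr (fun hc => lt_irrefl c (pv_tail_gt c rest hp c hc))
  calc (c :: rest).count c = rest.count c + 1 := List.count_cons_self
    _ = ((rest.takeWhile (fun x => x == c)) ++ (rest.dropWhile (fun x => x == c))).count c + 1 := by rw [hsplit]
    _ = 1 + (rest.takeWhile (fun x => x == c)).length := by
        rw [List.count_append, h1, h2]; omega

theorem pv_count_ne (c d : Char) (rest : List Char) (hd : d ≠ c) :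
    (c :: rest).count d = (rest.dropWhile (fun x => x == c)).count d := by
  have hsplit : rest.takeWhile (fun x => x == c) ++ rest.dropWhile (fun x => x == c) = rest :=
    List.takeWhile_append_dropWhile
  have h1 : (rest.takeWhile (fun x => x == c)).count d = 0 :=
    List.count_eq_zero.mpr (fun hc => hd (by simpa using List.mem_takeWhile_imp hc))
  have hdc : (c == d) = false := by simp [Ne.symm hd]
  calc (c :: rest).count d = rest.count d := by
        rw [List.count_cons, hdc]; simp
    _ = ((rest.takeWhile (fun x => x == c)) ++ (rest.dropWhile (fun x => x == c))).count d := by rw [hsplit]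
    _ = (rest.dropWhile (fun x => x == c)).count d := by rw [List.count_append, h1]; omega

theorem pv_mem_tail (c d : Char) (rest : List Char) (hd : d ≠ c) (hmem : d ∈ c :: rest) :
    d ∈ rest.dropWhile (fun x => x == c) := by
  rcases List.mem_cons.mp hmem with rfl | hmem
  · exact absurd rfl hd
  · rw [← List.takeWhile_append_dropWhile (p := fun x => x == c) (l := rest)] at hmem
    rcases List.mem_append.mp hmem with h | h
    · exact absurd (by simpa using List.mem_takeWhile_imp h) hd
    · exact h

-- B's condition on any sorted (Pairwise ≤) list: a run of exactly 3 = a character with count 3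
theorem pv_runScan3_iff : ∀ (l : List Char), l.Pairwise (· ≤ ·) →
    (pvRunScan3 l = true ↔ ∃ ch ∈ l, l.count ch = 3) := by
  intro l
  induction l using pvRunScan3.induct with
  | case1 => intro _; simp [pvRunScan3]
  | case2 c rest run hrun =>
    intro hp
    rw [show pvRunScan3 (c :: rest) = true by rw [pvRunScan3]; exact if_pos hrun]
    simp only [true_iff]
    refine ⟨c, List.mem_cons_self, ?_⟩
    rw [pv_count_head c rest hp]
    simpa using hrun
  | case3 c rest run hrun ih =>
    intro hp
    have htp : (rest.dropWhile (fun x => x == c)).Pairwise (· ≤ ·) :=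
      List.Pairwise.sublist (List.dropWhile_sublist _) (List.pairwise_cons.mp hp).2
    have ihh := ih htp
    rw [show pvRunScan3 (c :: rest) = pvRunScan3 (rest.dropWhile (fun x => x == c)) by
      rw [pvRunScan3]; exact if_neg (by simpa using hrun)]
    rw [ihh]
    constructor
    · rintro ⟨ch, hch, hcount⟩
      have hchne : ch ≠ c := fun h => by
        subst h; exact lt_irrefl ch (pv_tail_gt ch rest hp ch hch)
      refine ⟨ch, List.mem_cons_of_mem _ ((List.dropWhile_sublist _).mem hch), ?_⟩
      rw [pv_count_ne c ch rest hchne]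
      exact hcount
    · rintro ⟨ch, hch, hcount⟩
      by_cases hchc : ch = c
      · subst hchc
        rw [pv_count_head ch rest hp] at hcount
        exact absurd hcount (by simpa using hrun)
      · refine ⟨ch, pv_mem_tail c ch rest hchc hch, ?_⟩
        rw [← pv_count_ne c ch rest hchc]
        exact hcount

-- ===== VERDICT (by name: the statement is the Claim_ definition above) =====
theorem hasThreeOfKind_spec : Claim_equal_hasThreeOfKind := by
  intro value playercards cards _
  unfold Spec_hasThreeOfKind hasThreeOfKind hasThreeOfKind_alt
  dsimp only
  rw [pv_strip_eq playercards]
  set stripped := playercards.toList.filter (fun c => !(("SCDH ".toList).contains c)) with hs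
  have hperm : (PySem.List.sorted stripped (fun x => x) false).Perm stripped :=
    PySem.List.sorted_perm stripped (fun x => x) false
  have hiff : ((PySem.Set.ofList (stripped.foldl (fun d y => d.modify y 0 (· + 1)) (PySem.Dict.empty : PySem.Dict Char Int)).values).find? (fun x => x == (3 : Int))).isSome
      ↔ pvRunScan3 (PySem.List.sorted stripped (fun x => x) false) = true := by
    rw [pv_condA, pv_runScan3_iff _ (PySem.List.sorted_pairwise stripped (fun x => x))]
    constructor
    · rintro ⟨ch, hch, hc⟩
      exact ⟨ch, hperm.mem_iff.mpr hch, by rw [hperm.count_eq]; exact hc⟩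
    · rintro ⟨ch, hch, hc⟩
      exact ⟨ch, hperm.mem_iff.mp hch, by rw [← hperm.count_eq]; exact hc⟩
  cases hfind : (PySem.Set.ofList (stripped.foldl (fun d y => d.modify y 0 (· + 1)) (PySem.Dict.empty : PySem.Dict Char Int)).values).find? (fun x => x == (3 : Int)) with
  | some x =>
    have hrun : pvRunScan3 (PySem.List.sorted stripped (fun x => x) false) = true :=
      hiff.mp (by rw [hfind]; rfl)
    rw [hrun, if_pos rfl]
    exact Prod.ext rfl (by rw [hs, ← pv_strip_eq playercards, String.ofList_toList])
  | none =>
    have hrun : pvRunScan3 (PySem.List.sorted stripped (fun x => x) false) = false := by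
      rcases Bool.eq_false_or_eq_true (pvRunScan3 (PySem.List.sorted stripped (fun x => x) false)) with h | h
      · exact absurd (hiff.mpr h) (by rw [hfind]; simp)
      · exact h
    rw [hrun]
    simp
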